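-- pv_equiv track=rewrite | github.com/vigneshsabapathi/python-algorithms | bit_manipulation/gray_code_sequence_optimized.py | verify_gray_properties
-- ===== SOURCE A (Python) =====
-- def verify_gray_properties(seq: list[int], n: int) -> dict[str, bool]:
--     """Check all 5 Gray code properties."""
--     size = 1 << n
--     return {
--         "length":     len(seq) == size,
--         "range":      all(0 <= x < size for x in seq),
--         "starts_0":   seq[0] == 0,
--         "unique":     len(set(seq)) == size,
--         "adjacent":   all(bin(seq[i] ^ seq[i+1]).count("1") == 1
--                           for i in range(len(seq) - 1)),
--         "wraparound": bin(seq[-1] ^ seq[0]).count("1") == 1,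
--     }
-- ===== SOURCE B (Python) =====
-- def verify_gray_properties(seq: list[int], n: int) -> dict[str, bool]:
--     """Check all 5 Gray code properties via a sort-then-scan strategy:
--     sorting replaces the hash set (distinct count = 1 + number of strictly
--     increasing adjacent pairs of the sorted list) and gives the range check
--     for free from the two ends of the sorted list."""
--     size = 1 << n
--     first, last = seq[0], seq[-1]
--     s = sorted(seq)
--     distinct = 1 + sum(1 for a, b in zip(s, s[1:]) if a != b)
--     return {
--         "length": len(seq) == size,
--         "range": s[0] >= 0 and s[-1] < size,
--         "starts_0": first == 0,
--         "unique": distinct == size,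
--         "adjacent": all((a ^ b).bit_count() == 1 for a, b in zip(seq, seq[1:])),
--         "wraparound": (last ^ first).bit_count() == 1,
--     }
-- ===== Notes on version B (the rewrite author's own statement) =====
-- stated objective: alternative
-- what changed: Replaced A's hash-set/per-element comprehensions with a sort-then-scan strategy: the distinct count is 1 + the number of unequal adjacent pairs of sorted(seq), the range check reads only the two ends of the sorted list, and adjacency is checked over zip(seq, seq[1:]) instead of an index loop.
import Mathlib
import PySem

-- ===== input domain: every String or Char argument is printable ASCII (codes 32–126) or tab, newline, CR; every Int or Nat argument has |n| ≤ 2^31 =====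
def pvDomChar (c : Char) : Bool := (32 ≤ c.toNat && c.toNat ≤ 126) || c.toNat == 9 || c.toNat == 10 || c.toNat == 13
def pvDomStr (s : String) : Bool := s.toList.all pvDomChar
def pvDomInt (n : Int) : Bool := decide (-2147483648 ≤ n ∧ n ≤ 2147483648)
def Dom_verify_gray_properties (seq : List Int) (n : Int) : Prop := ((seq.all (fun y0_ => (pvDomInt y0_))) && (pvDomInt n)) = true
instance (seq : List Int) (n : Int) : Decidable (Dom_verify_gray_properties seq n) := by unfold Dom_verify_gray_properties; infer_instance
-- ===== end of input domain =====

-- B replaces A's hash-set/per-element scans by sort-then-scan (distinct count and range bounds read off the sorted list); same return value, B is not claimed faster.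


-- ===== PORT A =====
def verify_gray_properties (seq : List Int) (n : Int) : List (String × Bool) :=
  if n < 0 then []  -- Python: 1 << n raises ValueError for n < 0 (outside Pre_)
  else
    let size : Int := (1 : Int) <<< n.toNat
    match PySem.List.pyGet? seq 0, PySem.List.pyGet? seq (-1) with
    | some s0, some slast =>
      [("length", decide ((seq.length : Int) = size)),
       ("range", seq.all (fun x => decide (0 ≤ x ∧ x < size))),
       ("starts_0", decide (s0 = 0)),
       ("unique", decide (((PySem.Set.ofList seq).length : Int) = size)),
       ("adjacent", (PySem.List.pyRange 0 ((seq.length : Int) - 1) 1).all (fun i =>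
          decide (PySem.Int.bitCount (PySem.Int.bxor (PySem.List.pyGetD seq i 0) (PySem.List.pyGetD seq (i + 1) 0)) = 1))),
       ("wraparound", decide (PySem.Int.bitCount (PySem.Int.bxor slast s0) = 1))]
    | _, _ => []  -- IndexError on empty seq (outside Pre_)

-- ===== PORT B =====
def verify_gray_properties_alt (seq : List Int) (n : Int) : List (String × Bool) :=
  if n < 0 then []  -- Python: 1 << n raises ValueError for n < 0 (outside Pre_)
  else
    let size : Int := (1 : Int) <<< n.toNat
    match PySem.List.pyGet? seq 0 with
    | none => []  -- IndexError on empty seq (outside Pre_)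
    | some first =>
      match PySem.List.pyGet? seq (-1) with
      | none => []
      | some last =>
        let s := PySem.List.sorted seq (fun x => x) false
        let distinct : Int := 1 + ((s.zip s.tail).map (fun p => if p.1 ≠ p.2 then (1 : Int) else 0)).sum
        match PySem.List.pyGet? s 0 with
        | none => []  -- unreachable: sorted of a nonempty list is nonempty
        | some smin =>
          match PySem.List.pyGet? s (-1) with
          | none => []
          | some smax =>
            [("length", decide ((seq.length : Int) = size)),
             ("range", decide (0 ≤ smin) && decide (smax < size)),
             ("starts_0", decide (first = 0)),
             ("unique", decide (distinct = size)),
             ("adjacent", (seq.zip seq.tail).all (fun p => decide (PySem.Int.bitCount (PySem.Int.bxor p.1 p.2) = 1))),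
             ("wraparound", decide (PySem.Int.bitCount (PySem.Int.bxor last first) = 1))]

-- ===== PRECONDITION & SPEC =====
-- Pre_ excludes exactly the inputs on which A raises: empty seq (IndexError on seq[0]) and n < 0 (ValueError on 1 << n).
def Pre_verify_gray_properties (seq : List Int) (n : Int) : Prop := seq ≠ [] ∧ 0 ≤ n
instance (seq : List Int) (n : Int) : Decidable (Pre_verify_gray_properties seq n) := by
  unfold Pre_verify_gray_properties; infer_instance
def pvWitness_verify_gray_properties : List Int × Int := ([0, 1], 1)
def Spec_verify_gray_properties (seq : List Int) (n : Int) (out : List (String × Bool)) : Prop := out = verify_gray_properties_alt seq n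
instance (seq : List Int) (n : Int) (out : List (String × Bool)) : Decidable (Spec_verify_gray_properties seq n out) := by unfold Spec_verify_gray_properties; infer_instance

-- ===== CLAIM (what is proved, stated in full; the proofs are below) =====
def Claim_equal_verify_gray_properties : Prop := ∀ (seq : List Int) (n : Int), Dom_verify_gray_properties seq n → Pre_verify_gray_properties seq n → Spec_verify_gray_properties seq n (verify_gray_properties seq n)

-- ===== LEMMAS AND PROOFS =====

theorem le_getLast_of_pairwise : ∀ (l : List Int) (_ : l.Pairwise (· ≤ ·)) (hne : l ≠ []),
    ∀ y ∈ l, y ≤ l.getLast hne := by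
  intro l
  induction l with
  | nil => intro _ hne; exact absurd rfl hne
  | cons x t ih =>
    intro h hne y hy
    cases t with
    | nil =>
      simp only [List.mem_singleton] at hy
      simp [hy]
    | cons z t' =>
      rw [List.getLast_cons (by simp)]
      rcases List.mem_cons.mp hy with rfl | hyt
      · exact (List.pairwise_cons.mp h).1 _ (List.getLast_mem _)
      · exact ih (List.pairwise_cons.mp h).2 (by simp) y hyt

theorem sorted_head_last_range (l : List Int) (m : Int) (t : List Int) (size : Int)
    (hs : PySem.List.sorted l (fun x => x) false = m :: t) :
    (decide (0 ≤ m) && decide ((m :: t).getLast (by simp) < size)) =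
      l.all (fun x => decide (0 ≤ x ∧ x < size)) := by
  have hperm : (m :: t).Perm l := hs ▸ PySem.List.sorted_perm l (fun x => x) false
  have hpw : (m :: t).Pairwise (· ≤ ·) := by
    have := PySem.List.sorted_pairwise l (fun x => x)
    rw [hs] at this; exact this
  have hhead := PySem.List.key_head_sorted_le l (fun x => x) hs
  have hlast := le_getLast_of_pairwise (m :: t) hpw (by simp)
  rw [Bool.eq_iff_iff]
  simp only [Bool.and_eq_true, decide_eq_true_eq, List.all_eq_true]
  constructor
  · rintro ⟨h0, hL⟩ x hx
    refine ⟨le_trans h0 (hhead x hx), lt_of_le_of_lt (hlast x (hperm.mem_iff.mpr hx)) hL⟩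
  · intro h
    refine ⟨(h m (hperm.subset (by simp))).1, (h _ (hperm.subset (List.getLast_mem _))).2⟩

theorem distinct_chain : ∀ (t : List Int) (x : Int), (x :: t).Pairwise (· ≤ ·) →
    1 + List.countP (fun p => decide (p.1 ≠ p.2)) ((x :: t).zip t) = (x :: t).toFinset.card := by
  intro t
  induction t with
  | nil => intro x _; simp
  | cons y t' ih =>
    intro x h
    have hxy : x ≤ y := (List.pairwise_cons.mp h).1 y (by simp)
    have hrest := ih y (List.pairwise_cons.mp h).2
    simp only [ne_eq, List.zip_cons_cons, List.countP_cons, List.toFinset_cons] at hrest ⊢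
    by_cases hxe : x = y
    · subst hxe
      rw [Finset.insert_eq_self.mpr (by simp)]
      simp only [not_true_eq_false, decide_false, Bool.false_eq_true, if_false]
      omega
    · have hnotmem : x ∉ insert y t'.toFinset := by
        simp only [Finset.mem_insert, List.mem_toFinset]
        push Not
        refine ⟨hxe, fun hx' => ?_⟩
        have hyz : y ≤ x := (List.pairwise_cons.mp (List.pairwise_cons.mp h).2).1 x hx'
        exact hxe (le_antisymm hxy hyz)
      rw [Finset.card_insert_of_notMem hnotmem]
      simp only [hxe, not_false_eq_true, decide_true, if_true]
      omega

theorem setlen_eq_card (l : List Int) : (PySem.Set.ofList l).length = l.toFinset.card := by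
  rw [← PySem.List.dedup_eq_ofList]
  have hnd := PySem.List.nodup_dedup l
  rw [← List.toFinset_card_of_nodup hnd]
  congr 1
  ext x
  simp only [List.mem_toFinset]
  exact PySem.List.mem_dedup l x

theorem distinct_count_eq_setlen (l : List Int) (m : Int) (t : List Int)
    (hs : PySem.List.sorted l (fun x => x) false = m :: t) :
    1 + (((m :: t).zip t).map (fun p => if p.1 ≠ p.2 then (1 : Int) else 0)).sum =
      ((PySem.Set.ofList l).length : Int) := by
  have hpw : (m :: t).Pairwise (· ≤ ·) := by
    have := PySem.List.sorted_pairwise l (fun x => x)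
    rw [hs] at this; exact this
  have hperm : (m :: t).Perm l := hs ▸ PySem.List.sorted_perm l (fun x => x) false
  have hsum := PySem.List.sum_map_ite_one_zero (fun p : Int × Int => decide (p.1 ≠ p.2)) ((m :: t).zip t)
  simp only [decide_eq_true_eq] at hsum
  have hfs : (m :: t).toFinset = l.toFinset := by
    ext x
    simp only [List.mem_toFinset]
    exact hperm.mem_iff
  rw [setlen_eq_card, ← hfs, ← distinct_chain t m hpw]
  push_cast
  rw [hsum]

theorem adj_nat (d : Int → Int → Bool) : ∀ (xs : List Int) (x : Int),
    (List.range xs.length).all (fun k => d ((x :: xs).getD k 0) ((x :: xs).getD (k + 1) 0)) =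
      ((x :: xs).zip xs).all (fun p => d p.1 p.2) := by
  intro xs
  induction xs with
  | nil => intro x; rfl
  | cons y t' ih =>
    intro x
    simp only [List.length_cons]
    rw [List.range_succ_eq_map, List.all_cons, List.all_map, List.zip_cons_cons, List.all_cons]
    have hcomp : ((fun k => d ((x :: y :: t').getD k 0) ((x :: y :: t').getD (k + 1) 0)) ∘ Nat.succ)
        = (fun k => d ((y :: t').getD k 0) ((y :: t').getD (k + 1) 0)) := by
      funext k; rfl
    rw [hcomp, ih y]
    rfl

theorem adj_index_eq_zip (l : List Int) :
    (PySem.List.pyRange 0 ((l.length : Int) - 1) 1).all (fun i =>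
        decide (PySem.Int.bitCount (PySem.Int.bxor (PySem.List.pyGetD l i 0) (PySem.List.pyGetD l (i + 1) 0)) = 1)) =
      (l.zip l.tail).all (fun p => decide (PySem.Int.bitCount (PySem.Int.bxor p.1 p.2) = 1)) := by
  cases l with
  | nil => rfl
  | cons x xs =>
    have hlen : ((x :: xs).length : Int) - 1 = ((xs.length : Nat) : Int) := by
      simp [List.length_cons]
    rw [hlen, PySem.List.pyRange_zero_natCast, List.all_map]
    rw [List.tail_cons, ← adj_nat (fun a b => decide (PySem.Int.bitCount (PySem.Int.bxor a b) = 1)) xs x]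
    congr 1
    funext k
    simp only [Function.comp_def]
    have hk : ((k : Int) + 1) = (((k + 1 : Nat)) : Int) := by push_cast; ring
    rw [hk]
    simp only [PySem.List.pyGetD_natCast]

-- ===== VERDICT (by name: the statement is the Claim_ definition above) =====
theorem verify_gray_properties_spec : Claim_equal_verify_gray_properties := by
  intro seq n _ hpre
  unfold Spec_verify_gray_properties verify_gray_properties verify_gray_properties_alt
  by_cases hn : n < 0
  · simp [hn]
  · simp only [if_neg hn]
    cases h0 : PySem.List.pyGet? seq 0 with
    | none => rfl
    | some s0 =>
      cases h1 : PySem.List.pyGet? seq (-1) with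
      | none => rfl
      | some slast =>
        have hne : seq ≠ [] := hpre.1
        obtain ⟨m, t, hs⟩ : ∃ m t, PySem.List.sorted seq (fun x => x) false = m :: t := by
          rcases hsl : PySem.List.sorted seq (fun x => x) false with _ | ⟨a, b⟩
          · exact absurd ((PySem.List.sorted_eq_nil_iff _ _ _).mp hsl) hne
          · exact ⟨a, b, rfl⟩
        simp only [hs, PySem.List.pyGet?_zero_cons,
          PySem.List.pyGet?_neg_one, List.getLast?_eq_some_getLast (l := m :: t) (by simp)]
        simp only [List.cons.injEq, Prod.mk.injEq, and_true, true_and, List.tail_cons]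
        refine ⟨?_, ?_, ?_⟩
        · exact (sorted_head_last_range seq m t _ hs).symm
        · rw [← distinct_count_eq_setlen seq m t hs]
          rfl
        · exact adj_index_eq_zip seq
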